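-- pv_equiv track=rewrite | github.com/knitty-kim/ProgrammersSolvingCode | 프로그래머스/1/42840. 모의고사/모의고사.py | solution
-- ===== SOURCE A (Python) =====
-- def solution(answers):
--     person1 = [1, 2, 3, 4, 5] * (len(answers)//5 + 5)
--     person2 = [2, 1, 2, 3, 2, 4, 2, 5] * (len(answers)//8 + 8)
--     person3 = [3, 3, 1, 1, 2, 2, 4, 4, 5, 5] * (len(answers)//10 + 10)
--
--     cnt = [0, 0, 0]
--     for i in range(len(answers)):
--         if answers[i] == person1[i]:
--             cnt[0] += 1
--         if answers[i] == person2[i]: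
--             cnt[1] += 1
--         if answers[i] == person3[i]:
--             cnt[2] += 1
--     return [i+1 for i, v in enumerate(cnt) if v == max(cnt)]
-- ===== SOURCE B (Python) =====
-- def solution(answers):
--     # Histogram algorithm: the three answer keys are all periodic with period dividing 40,
--     # so one pass builds a histogram keyed by (position mod 40, answer); each score is then
--     # a fixed 40-term sum of histogram lookups, independent of which answers matched where.
--     PERIOD = 40
--     hist = {}
--     for i, a in enumerate(answers):
--         key = (i % PERIOD, a)
--         hist[key] = hist.get(key, 0) + 1
--     patterns = [[1, 2, 3, 4, 5], [2, 1, 2, 3, 2, 4, 2, 5], [3, 3, 1, 1, 2, 2, 4, 4, 5, 5]]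
--     scores = [sum(hist.get((r, p[r % len(p)]), 0) for r in range(PERIOD)) for p in patterns]
--     best = max(scores)
--     return [k for k in (1, 2, 3) if scores[k - 1] == best]
-- ===== Notes on version B (the rewrite author's own statement) =====
-- stated objective: alternative
-- what changed: Replaced A's answer-major pass over three oversized repeated answer-key lists by a histogram algorithm: one pass builds a dict counting answers per position-mod-40 (40 = lcm of the pattern periods), and each score is then a fixed 40-term sum of histogram lookups instead of per-answer comparisons.
import Mathlib
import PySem

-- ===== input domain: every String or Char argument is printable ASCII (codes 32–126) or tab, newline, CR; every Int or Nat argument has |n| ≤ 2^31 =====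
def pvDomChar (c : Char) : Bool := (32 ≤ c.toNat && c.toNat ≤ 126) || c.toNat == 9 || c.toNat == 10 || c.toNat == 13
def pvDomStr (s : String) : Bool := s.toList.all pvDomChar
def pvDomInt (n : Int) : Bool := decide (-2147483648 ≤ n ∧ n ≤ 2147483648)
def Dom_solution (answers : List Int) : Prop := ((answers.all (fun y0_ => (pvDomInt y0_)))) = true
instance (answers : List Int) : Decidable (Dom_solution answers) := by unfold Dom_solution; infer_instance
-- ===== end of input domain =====

-- B replaces A's answer-major pass over oversized repeated answer-key lists by a histogram
-- algorithm: one pass counts answers per (position mod 40, value), then each score is a fixed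
-- 40-term sum of histogram lookups (alternative decomposition; return value only).

-- ===== PORT A =====
def solution (answers : List Int) : List Int :=
  let n : Int := PySem.List.len answers
  let person1 := PySem.List.pyRepeat ([1, 2, 3, 4, 5] : List Int) (PySem.Int.floordiv n 5 + 5)
  let person2 := PySem.List.pyRepeat ([2, 1, 2, 3, 2, 4, 2, 5] : List Int) (PySem.Int.floordiv n 8 + 8)
  let person3 := PySem.List.pyRepeat ([3, 3, 1, 1, 2, 2, 4, 4, 5, 5] : List Int) (PySem.Int.floordiv n 10 + 10)
  -- for i in range(len(answers)): three independent 'if …: cnt[k] += 1' on the triple cnt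
  -- (indices are always in range, so pyGetD with default 0 is exact here)
  let cnt : Int × Int × Int := (PySem.List.pyRange 0 n 1).foldl (fun c i =>
      let c := if PySem.List.pyGetD answers i 0 = PySem.List.pyGetD person1 i 0 then (c.1 + 1, c.2.1, c.2.2) else c
      let c := if PySem.List.pyGetD answers i 0 = PySem.List.pyGetD person2 i 0 then (c.1, c.2.1 + 1, c.2.2) else c
      if PySem.List.pyGetD answers i 0 = PySem.List.pyGetD person3 i 0 then (c.1, c.2.1, c.2.2 + 1) else c)
    (0, 0, 0)
  let cntList : List Int := [cnt.1, cnt.2.1, cnt.2.2]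
  -- [i+1 for i, v in enumerate(cnt) if v == max(cnt)]  (cnt is nonempty so max() never raises)
  match PySem.List.max? cntList (fun y => y) with
  | none => []
  | some m => ((PySem.List.enumerate cntList 0).filter (fun q => q.2 == m)).map (fun q => q.1 + 1)

-- ===== PORT B =====
def solution_alt (answers : List Int) : List Int :=
  -- hist[(i % 40, a)] = hist.get((i % 40, a), 0) + 1  over enumerate(answers)
  let hist : PySem.Dict (Int × Int) Int :=
    (PySem.List.enumerate answers 0).foldl
      (fun h q => h.insert (PySem.Int.mod q.1 40, q.2) (h.getD (PySem.Int.mod q.1 40, q.2) 0 + 1))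
      PySem.Dict.empty
  let patterns : List (List Int) := [[1, 2, 3, 4, 5], [2, 1, 2, 3, 2, 4, 2, 5], [3, 3, 1, 1, 2, 2, 4, 4, 5, 5]]
  -- scores = [sum(hist.get((r, p[r % len(p)]), 0) for r in range(40)) for p in patterns]
  -- (0 ≤ r < 40 and len(p) > 0, so p[r % len(p)] is in range: pyGetD is exact here)
  let scores : List Int := patterns.map (fun p =>
    ((PySem.List.pyRange 0 40 1).map (fun r =>
      hist.getD (r, PySem.List.pyGetD p (PySem.Int.mod r (PySem.List.len p)) 0) 0)).sum)
  -- best = max(scores)  (scores has 3 elements so max() never raises)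
  match PySem.List.max? scores (fun y => y) with
  | none => []
  | some best => ([1, 2, 3] : List Int).filter (fun k => PySem.List.pyGetD scores (k - 1) 0 == best)

-- ===== PRECONDITION & SPEC =====
def Spec_solution (answers : List Int) (out : List Int) : Prop := out = solution_alt answers
instance (answers : List Int) (out : List Int) : Decidable (Spec_solution answers out) := by unfold Spec_solution; infer_instance

-- ===== CLAIM (what is proved, stated in full; the proofs are below) =====
def Claim_equal_solution : Prop := ∀ (answers : List Int), Dom_solution answers → Spec_solution answers (solution answers)

-- ===== LEMMAS AND PROOFS =====

-- the common form both sides are reduced to: per-pattern score as a countP over range(len(answers))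
def pvScore (answers p : List Int) : Int :=
  ((PySem.List.pyRange 0 (PySem.List.len answers) 1).countP
    (fun i => decide (PySem.List.pyGetD answers i 0
      = PySem.List.pyGetD p (PySem.Int.mod i (PySem.List.len p)) 0)) : Int)

-- indexing into a flattened replicate is modulo indexing into the block
lemma getD_flatten_replicate {α : Type} (xs : List α) (m k : Nat) (d : α)
    (hk : k < xs.length * m) :
    ((List.replicate m xs).flatten).getD k d = xs.getD (k % xs.length) d := by
  induction m generalizing k with
  | zero => omega
  | succ m ih =>
    rw [Nat.mul_succ] at hk
    have hL : 0 < xs.length := by by_contra h; simp at h; simp [h] at hk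
    rw [List.replicate_succ, List.flatten_cons]
    by_cases h : k < xs.length
    · rw [List.getD_append _ _ _ _ h, Nat.mod_eq_of_lt h]
    · push Not at h
      rw [List.getD_append_right _ _ _ _ h, ih (k - xs.length) (by omega),
        Nat.mod_eq_sub_mod h]

-- A's long repeated key list agrees with modulo indexing into the pattern, for indices < n
lemma pyGetD_pyRepeat_mod (pat : List Int) (answers : List Int)
    (m : Int) (hm : answers.length ≤ pat.length * m.toNat)
    (j : Int) (hj : 0 ≤ j ∧ j < (answers.length : Int)) :
    PySem.List.pyGetD (PySem.List.pyRepeat pat m) j 0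
      = PySem.List.pyGetD pat (PySem.Int.mod j (PySem.List.len pat)) 0 := by
  obtain ⟨hj0, hjn⟩ := hj
  obtain ⟨k, rfl⟩ : ∃ k : Nat, j = (k : Int) := ⟨j.toNat, (Int.toNat_of_nonneg hj0).symm⟩
  have hkn : k < answers.length := by exact_mod_cast hjn
  rw [PySem.List.pyRepeat]
  have hmod : PySem.Int.mod (k : Int) (PySem.List.len pat) = ((k % pat.length : Nat) : Int) := by
    rw [PySem.List.len, PySem.Int.mod_natCast]
  rw [hmod, PySem.List.pyGetD_natCast, PySem.List.pyGetD_natCast]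
  exact getD_flatten_replicate pat m.toNat k 0 (by omega)

-- a fold with three independent counters is three independent counting folds
lemma foldl_triple {α : Type} (l : List α) (q1 q2 q3 : α → Prop)
    [DecidablePred q1] [DecidablePred q2] [DecidablePred q3] (c : Int × Int × Int) :
    l.foldl (fun c i =>
        let c := if q1 i then (c.1 + 1, c.2.1, c.2.2) else c
        let c := if q2 i then (c.1, c.2.1 + 1, c.2.2) else c
        if q3 i then (c.1, c.2.1, c.2.2 + 1) else c) c
      = (l.foldl (fun a i => if q1 i then a + 1 else a) c.1,
         l.foldl (fun a i => if q2 i then a + 1 else a) c.2.1,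
         l.foldl (fun a i => if q3 i then a + 1 else a) c.2.2) := by
  induction l generalizing c with
  | nil => rfl
  | cons x xs ih =>
    simp only [List.foldl_cons]
    rw [ih]
    split_ifs <;> rfl

-- the repeated key lists of A are long enough to cover every index of answers
lemma repeat_big (answers : List Int) (L : Nat) (hL : 0 < L) :
    answers.length ≤ L * (PySem.Int.floordiv (PySem.List.len answers) (L : Int) + (L : Int)).toNat := by
  have hLi : (0:Int) < (L:Int) := by exact_mod_cast hL
  have hfd : PySem.Int.floordiv (PySem.List.len answers) (L : Int)
      = (PySem.List.len answers) / (L : Int) := PySem.Int.floordiv_eq_ediv_of_pos hLi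
  set n : Int := PySem.List.len answers with hn
  have hn0 : (0:Int) ≤ n ∧ n = (answers.length : Int) := by simp [hn, PySem.List.len]
  have hq : (0:Int) ≤ n / (L:Int) := Int.ediv_nonneg hn0.1 (le_of_lt hLi)
  have h4 := Int.emod_add_mul_ediv n (L:Int)
  have h3 := Int.emod_lt_of_pos n hLi
  have h5 : (((n / (L:Int) + (L:Int))).toNat : Int) = n / (L:Int) + (L:Int) :=
    Int.toNat_of_nonneg (by omega)
  have key : n ≤ (L:Int) * ((n / (L:Int) + (L:Int)).toNat : Int) := by
    rw [h5]
    have hLL : (L:Int) ≤ (L:Int) * (L:Int) := le_mul_of_one_le_left (le_of_lt hLi) (by omega)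
    nlinarith [h4, h3, hLL]
  rw [hfd]
  have := hn0.2
  omega

-- A's counter for a pattern p equals pvScore answers p
lemma cntFold_eq_pvScore (answers pat : List Int)
    (m : Int) (hm : answers.length ≤ pat.length * m.toNat) :
    (PySem.List.pyRange 0 (PySem.List.len answers) 1).foldl
        (fun a i => if PySem.List.pyGetD answers i 0
            = PySem.List.pyGetD (PySem.List.pyRepeat pat m) i 0 then a + 1 else a) (0 : Int)
      = pvScore answers pat := by
  have h1 : (PySem.List.pyRange 0 (PySem.List.len answers) 1).foldl
        (fun a i => if PySem.List.pyGetD answers i 0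
          = PySem.List.pyGetD (PySem.List.pyRepeat pat m) i 0 then a + 1 else a) (0 : Int)
      = (PySem.List.pyRange 0 (PySem.List.len answers) 1).foldl
        (fun a i => if PySem.List.pyGetD answers i 0
          = PySem.List.pyGetD pat (PySem.Int.mod i (PySem.List.len pat)) 0 then a + 1 else a) (0 : Int) := by
    apply PySem.List.foldl_congr_mem
    intro acc i hi
    rw [PySem.List.mem_pyRange_one] at hi
    simp only [pyGetD_pyRepeat_mod pat answers m hm i (by simpa [PySem.List.len] using hi)]
  rw [h1, PySem.List.foldl_ite_add_one]
  simp [pvScore]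

-- summing counts of (r, g r) over the nodup range covering all first components is a countP
lemma sum_count_keys (L : List Int) (hnd : L.Nodup) (g : Int → Int) (ks : List (Int × Int))
    (h : ∀ q ∈ ks, q.1 ∈ L) :
    (L.map (fun r => (ks.count (r, g r) : Int))).sum
      = (ks.countP (fun q => q.2 == g q.1) : Int) := by
  induction ks with
  | nil => simp
  | cons q ks ih =>
    have hq1 : q.1 ∈ L := h q (by simp)
    have hsplit : (L.map (fun r => (((q :: ks).count (r, g r) : Nat) : Int))).sum
        = (L.map (fun r => ((ks.count (r, g r) : Nat) : Int)
            + (if (q == (r, g r)) then (1 : Int) else 0))).sum := by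
      congr 1
      apply List.map_congr_left
      intro r _
      rw [List.count_cons]
      split_ifs <;> push_cast <;> ring
    rw [hsplit, PySem.List.sum_map_add_int, ih (fun p hp => h p (by simp [hp]))]
    have hone : ((L.map (fun r => if (q == (r, g r)) then (1 : Int) else 0)).sum)
        = (if (q.2 == g q.1) then (1 : Int) else 0) := by
      rw [PySem.List.sum_map_ite_one_zero (fun r => q == (r, g r)) L]
      by_cases hq2 : q.2 = g q.1
      · have : L.countP (fun r => q == (r, g r)) = L.count q.1 := by
          apply List.countP_congr
          intro r _
          simp only [beq_iff_eq]
          constructor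
          · rintro rfl; rfl
          · rintro rfl
            exact Prod.ext rfl hq2
        rw [this, List.count_eq_one_of_mem hnd hq1]
        simp [hq2]
      · have : L.countP (fun r => q == (r, g r)) = 0 := by
          rw [List.countP_eq_zero]
          intro r _ hr
          rw [beq_iff_eq] at hr
          exact hq2 (by rw [hr])
        rw [this]
        simp [hq2]
    rw [hone, List.countP_cons]
    push_cast
    split_ifs <;> ring

-- the histogram lookup is a count over the key stream
lemma getD_fold_key (l : List (Int × Int)) (v : Int × Int) :
    (l.foldl (fun h q => h.insert (PySem.Int.mod q.1 40, q.2) (h.getD (PySem.Int.mod q.1 40, q.2) 0 + 1))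
        (PySem.Dict.empty : PySem.Dict (Int × Int) Int)).getD v 0
      = (((l.map (fun q => (PySem.Int.mod q.1 40, q.2))).count v : Nat) : Int) := by
  have h := PySem.Dict.getD_foldl_insert_add_one (l.map (fun q => (PySem.Int.mod q.1 40, q.2)))
    (PySem.Dict.empty : PySem.Dict (Int × Int) Int) v
  rw [List.foldl_map] at h
  simpa [pysem] using h

-- B's score for a pattern p (positive length dividing 40) equals pvScore answers p
lemma score_eq_pvScore (answers p : List Int) (hp : 0 < p.length) (hdvd : (p.length : Int) ∣ 40) :
    ((PySem.List.pyRange 0 40 1).map (fun r =>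
        (((PySem.List.enumerate answers 0).foldl
          (fun h q => h.insert (PySem.Int.mod q.1 40, q.2) (h.getD (PySem.Int.mod q.1 40, q.2) 0 + 1))
          PySem.Dict.empty)).getD (r, PySem.List.pyGetD p (PySem.Int.mod r (PySem.List.len p)) 0) 0)).sum
      = pvScore answers p := by
  have hp0 : (0 : Int) < PySem.List.len p := by simpa [PySem.List.len] using hp
  have hmap : (PySem.List.pyRange 0 40 1).map (fun r =>
      (((PySem.List.enumerate answers 0).foldl
        (fun h q => h.insert (PySem.Int.mod q.1 40, q.2) (h.getD (PySem.Int.mod q.1 40, q.2) 0 + 1))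
        PySem.Dict.empty)).getD (r, PySem.List.pyGetD p (PySem.Int.mod r (PySem.List.len p)) 0) 0)
      = (PySem.List.pyRange 0 40 1).map (fun r =>
        ((((PySem.List.enumerate answers 0).map (fun q => (PySem.Int.mod q.1 40, q.2))).count
          (r, PySem.List.pyGetD p (PySem.Int.mod r (PySem.List.len p)) 0) : Nat) : Int)) := by
    apply List.map_congr_left
    intro r _
    exact getD_fold_key (PySem.List.enumerate answers 0) _
  rw [hmap]
  have hmem : ∀ q ∈ (PySem.List.enumerate answers 0).map (fun q => (PySem.Int.mod q.1 40, q.2)),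
      q.1 ∈ PySem.List.pyRange 0 40 1 := by
    intro q hq
    rw [List.mem_map] at hq
    obtain ⟨q0, _, rfl⟩ := hq
    rw [PySem.List.mem_pyRange_one]
    exact ⟨PySem.Int.mod_nonneg _ (by norm_num), PySem.Int.mod_lt _ (by norm_num)⟩
  rw [sum_count_keys (PySem.List.pyRange 0 40 1) (by decide)
      (fun r => PySem.List.pyGetD p (PySem.Int.mod r (PySem.List.len p)) 0) _ hmem]
  rw [List.countP_map, PySem.List.enumerate_eq_map_pyRange answers 0, List.countP_map]
  unfold pvScore
  congr 1
  apply List.countP_congr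
  intro i hi
  rw [PySem.List.mem_pyRange_one] at hi
  simp only [Function.comp]
  have hmm : PySem.Int.mod (PySem.Int.mod i 40) (PySem.List.len p)
      = PySem.Int.mod i (PySem.List.len p) := by
    rw [PySem.Int.mod_eq_emod_of_pos (by norm_num : (0:Int) < 40),
        PySem.Int.mod_eq_emod_of_pos hp0, PySem.Int.mod_eq_emod_of_pos hp0]
    exact Int.emod_emod_of_dvd i (by simpa [PySem.List.len] using hdvd)
  simp only [hmm]
  simp

-- both three-way selections coincide once the score lists do
lemma triple_select (a b c m : Int) :
    ((PySem.List.enumerate ([a, b, c] : List Int) 0).filter (fun q => q.2 == m)).map (fun q => q.1 + 1)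
      = ([1, 2, 3] : List Int).filter (fun k => PySem.List.pyGetD ([a, b, c] : List Int) (k - 1) 0 == m) := by
  simp only [PySem.List.enumerate_cons, PySem.List.enumerate_nil]
  cases ha : a == m <;> cases hb : b == m <;> cases hc : c == m <;>
    simp [List.filter, ha, hb, hc, PySem.List.pyGetD, PySem.List.pyIdx?, PySem.List.pyGet?]

-- ===== VERDICT (by name: the statement is the Claim_ definition above) =====
theorem solution_spec : Claim_equal_solution := by
  intro answers _
  unfold Spec_solution solution solution_alt
  simp only [List.map]
  rw [foldl_triple]
  simp only
  rw [cntFold_eq_pvScore answers [1,2,3,4,5] _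
        (by exact_mod_cast repeat_big answers 5 (by norm_num)),
      cntFold_eq_pvScore answers [2,1,2,3,2,4,2,5] _
        (by exact_mod_cast repeat_big answers 8 (by norm_num)),
      cntFold_eq_pvScore answers [3,3,1,1,2,2,4,4,5,5] _
        (by exact_mod_cast repeat_big answers 10 (by norm_num)),
      score_eq_pvScore answers [1,2,3,4,5] (by norm_num) (by norm_num),
      score_eq_pvScore answers [2,1,2,3,2,4,2,5] (by norm_num) (by norm_num),
      score_eq_pvScore answers [3,3,1,1,2,2,4,4,5,5] (by norm_num) (by norm_num)]
  cases h : PySem.List.max? [pvScore answers [1,2,3,4,5], pvScore answers [2,1,2,3,2,4,2,5],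
      pvScore answers [3,3,1,1,2,2,4,4,5,5]] (fun y => y) with
  | none => rfl
  | some m => exact triple_select _ _ _ m
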